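-- pv_equiv track=rewrite | github.com/haaland09009/Programmers | 완전탐색/모의고사.py | solution
-- ===== SOURCE A (Python) =====
-- def solution(answers):
--     answer = []
--     scores = [0,0,0]
--
--     a1 = [1,2,3,4,5]
--     a2 = [2,1,2,3,2,4,2,5]
--     a3 = [3,3,1,1,2,2,4,4,5,5]
--
--     for i in range(len(answers)):
--         if answers[i] == a1[i % len(a1)]:
--             scores[0] += 1
--
--         if answers[i] == a2[i % len(a2)]:
--             scores[1] += 1
--
--         if answers[i] == a3[i % len(a3)]:
--             scores[2] += 1
--
--     max_score = max(scores)
--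
--     for i in range(len(scores)):
--          if scores[i] == max_score:
--             answer.append(i+1)
--     answer.sort()
--
--
--     return answer
-- ===== SOURCE B (Python) =====
-- def solution(answers):
--     # Histogram approach: one pass builds a frequency table keyed by
--     # (position mod 40, answer value); 40 = lcm(5, 8, 10), so positions with
--     # equal residue mod 40 see the same expected answer from each supervisor.
--     # Each score is then read off the table in 40 lookups, independent of n.
--     P = 40
--     hist = {}
--     for i, a in enumerate(answers):
--         key = (i % P, a)
--         hist[key] = hist.get(key, 0) + 1
--     patterns = [[1, 2, 3, 4, 5],
--                 [2, 1, 2, 3, 2, 4, 2, 5],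
--                 [3, 3, 1, 1, 2, 2, 4, 4, 5, 5]]
--     scores = [sum(hist.get((r, p[r % len(p)]), 0) for r in range(P))
--               for p in patterns]
--     best = max(scores)
--     return [k + 1 for k, s in enumerate(scores) if s == best]
-- ===== Notes on version B (the rewrite author's own statement) =====
-- stated objective: alternative
-- what changed: A compares every answer against all three patterns in one combined pass; B instead builds a histogram keyed by (position mod 40, answer) in a single comparison-free pass (40 = lcm of the pattern lengths) and reads each supervisor's score off the table in 40 lookups, then emits the 1-based argmax indices in ascending order without A's redundant sort.
import Mathlib
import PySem

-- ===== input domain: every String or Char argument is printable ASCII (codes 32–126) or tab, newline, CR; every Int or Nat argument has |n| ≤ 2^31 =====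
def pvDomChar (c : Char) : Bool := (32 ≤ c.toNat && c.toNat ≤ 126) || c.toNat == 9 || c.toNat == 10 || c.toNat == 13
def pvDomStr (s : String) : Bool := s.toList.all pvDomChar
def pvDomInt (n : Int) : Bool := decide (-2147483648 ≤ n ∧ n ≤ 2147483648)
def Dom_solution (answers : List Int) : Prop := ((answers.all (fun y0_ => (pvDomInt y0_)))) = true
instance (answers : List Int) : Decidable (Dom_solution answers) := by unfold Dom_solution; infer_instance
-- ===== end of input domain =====

-- B replaces A's three-way comparison pass by a comparison-free histogram keyed by
-- (position mod 40, answer) — 40 = lcm(5,8,10) — from which each score is read in 40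
-- lookups; the redundant final sort is dropped. Objective: alternative algorithm, same cost.

-- ===== PORT A =====
def solution (answers : List Int) : List Int :=
  let a1 : List Int := [1,2,3,4,5]
  let a2 : List Int := [2,1,2,3,2,4,2,5]
  let a3 : List Int := [3,3,1,1,2,2,4,4,5,5]
  let scores :=
    (PySem.List.pyRange 0 (answers.length) 1).foldl
      (fun (s : Int × Int × Int) i =>
        ((if PySem.List.pyGet? answers i = PySem.List.pyGet? a1 (PySem.Int.mod i (a1.length)) then s.1 + 1 else s.1),
         (if PySem.List.pyGet? answers i = PySem.List.pyGet? a2 (PySem.Int.mod i (a2.length)) then s.2.1 + 1 else s.2.1),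
         (if PySem.List.pyGet? answers i = PySem.List.pyGet? a3 (PySem.Int.mod i (a3.length)) then s.2.2 + 1 else s.2.2)))
      (0, 0, 0)
  let scoresL : List Int := [scores.1, scores.2.1, scores.2.2]
  let maxScore : Int := (PySem.List.max? scoresL (fun x => x)).getD 0
  let answer : List Int :=
    (PySem.List.pyRange 0 (scoresL.length) 1).foldl
      (fun acc i => if PySem.List.pyGetD scoresL i 0 = maxScore then acc ++ [i + 1] else acc) []
  PySem.List.sorted answer (fun x => x)

-- ===== PORT B =====
-- the histogram loop: hist[(i % 40, a)] = hist.get((i % 40, a), 0) + 1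
def pvHist (answers : List Int) : PySem.Dict (Int × Int) Int :=
  (PySem.List.enumerate answers).foldl
    (fun d ia =>
      let key : Int × Int := (PySem.Int.mod ia.1 40, ia.2)
      d.insert key (d.getD key 0 + 1))
    PySem.Dict.empty
-- sum(hist.get((r, p[r % len(p)]), 0) for r in range(40)); the index r % len(p) is
-- always in range for the three concrete patterns, so p[...] is ported with pyGetD
def pvPatScore (hist : PySem.Dict (Int × Int) Int) (p : List Int) : Int :=
  (PySem.List.pyRange 0 40 1).foldl
    (fun acc r => acc + hist.getD (r, PySem.List.pyGetD p (PySem.Int.mod r (p.length)) 0) 0) 0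

def solution_alt (answers : List Int) : List Int :=
  let hist := pvHist answers
  let patterns : List (List Int) := [[1,2,3,4,5],[2,1,2,3,2,4,2,5],[3,3,1,1,2,2,4,4,5,5]]
  let scores : List Int := patterns.map (fun p => pvPatScore hist p)
  let best : Int := (PySem.List.max? scores (fun x => x)).getD 0
  (PySem.List.enumerate scores).foldl
    (fun acc ks => if ks.2 = best then acc ++ [ks.1 + 1] else acc) []

-- ===== PRECONDITION & SPEC =====
def Spec_solution (answers : List Int) (out : List Int) : Prop := out = solution_alt answers
instance (answers : List Int) (out : List Int) : Decidable (Spec_solution answers out) := by unfold Spec_solution; infer_instance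

-- ===== CLAIM (what is proved, stated in full; the proofs are below) =====
def Claim_equal_solution : Prop := ∀ (answers : List Int), Dom_solution answers → Spec_solution answers (solution answers)

-- ===== LEMMAS AND PROOFS =====

-- proof-side helper: the direct per-pattern match count (one comparison per answer)
def pvScore (p : List Int) (answers : List Int) : Int :=
  (PySem.List.enumerate answers).foldl
    (fun acc ia => if some ia.2 = PySem.List.pyGet? p (PySem.Int.mod ia.1 (p.length)) then acc + 1 else acc) 0

-- in-range indexing into the enumerated list yields the paired element
theorem pv_get_of_mem_enumerate (answers : List Int) (x : Int × Int)
    (hx : x ∈ PySem.List.enumerate answers 0) :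
    PySem.List.pyGet? answers x.1 = some x.2 := by
  obtain ⟨k, hk, rfl⟩ := (PySem.List.mem_enumerate_iff answers 0 x).1 hx
  simp [PySem.List.pyGet?_natCast, List.getElem?_eq_getElem hk]

-- splitting the product-state fold into its three independent component folds
theorem pv_split (answers : List Int) :
    (PySem.List.enumerate answers).foldl
    (fun (s : Int × Int × Int) (ia : Int × Int) =>
      ((if some ia.2 = PySem.List.pyGet? ([1,2,3,4,5] : List Int) (PySem.Int.mod ia.1 (([1,2,3,4,5] : List Int).length)) then s.1 + 1 else s.1),
       (if some ia.2 = PySem.List.pyGet? ([2,1,2,3,2,4,2,5] : List Int) (PySem.Int.mod ia.1 (([2,1,2,3,2,4,2,5] : List Int).length)) then s.2.1 + 1 else s.2.1),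
       (if some ia.2 = PySem.List.pyGet? ([3,3,1,1,2,2,4,4,5,5] : List Int) (PySem.Int.mod ia.1 (([3,3,1,1,2,2,4,4,5,5] : List Int).length)) then s.2.2 + 1 else s.2.2)))
    (0, 0, 0)
    = (pvScore [1,2,3,4,5] answers, pvScore [2,1,2,3,2,4,2,5] answers, pvScore [3,3,1,1,2,2,4,4,5,5] answers) := by
  have h2 := PySem.List.foldl_prod_mk
      (fun (a : Int) (ia : Int × Int) => if some ia.2 = PySem.List.pyGet? ([2,1,2,3,2,4,2,5] : List Int) (PySem.Int.mod ia.1 (([2,1,2,3,2,4,2,5] : List Int).length)) then a + 1 else a)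
      (fun (a : Int) (ia : Int × Int) => if some ia.2 = PySem.List.pyGet? ([3,3,1,1,2,2,4,4,5,5] : List Int) (PySem.Int.mod ia.1 (([3,3,1,1,2,2,4,4,5,5] : List Int).length)) then a + 1 else a)
      (PySem.List.enumerate answers) 0 0
  have h1 := PySem.List.foldl_prod_mk
      (fun (a : Int) (ia : Int × Int) => if some ia.2 = PySem.List.pyGet? ([1,2,3,4,5] : List Int) (PySem.Int.mod ia.1 (([1,2,3,4,5] : List Int).length)) then a + 1 else a)
      (fun (t : Int × Int) (ia : Int × Int) =>
        ((if some ia.2 = PySem.List.pyGet? ([2,1,2,3,2,4,2,5] : List Int) (PySem.Int.mod ia.1 (([2,1,2,3,2,4,2,5] : List Int).length)) then t.1 + 1 else t.1),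
         (if some ia.2 = PySem.List.pyGet? ([3,3,1,1,2,2,4,4,5,5] : List Int) (PySem.Int.mod ia.1 (([3,3,1,1,2,2,4,4,5,5] : List Int).length)) then t.2 + 1 else t.2)))
      (PySem.List.enumerate answers) 0 (0, 0)
  exact h1.trans (by rw [h2]; rfl)

-- A's combined counting pass equals the triple of direct per-pattern counts
theorem pv_scores_eq (answers : List Int) :
    (PySem.List.pyRange 0 (answers.length) 1).foldl
      (fun (s : Int × Int × Int) i =>
        ((if PySem.List.pyGet? answers i = PySem.List.pyGet? ([1,2,3,4,5] : List Int) (PySem.Int.mod i (([1,2,3,4,5] : List Int).length)) then s.1 + 1 else s.1),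
         (if PySem.List.pyGet? answers i = PySem.List.pyGet? ([2,1,2,3,2,4,2,5] : List Int) (PySem.Int.mod i (([2,1,2,3,2,4,2,5] : List Int).length)) then s.2.1 + 1 else s.2.1),
         (if PySem.List.pyGet? answers i = PySem.List.pyGet? ([3,3,1,1,2,2,4,4,5,5] : List Int) (PySem.Int.mod i (([3,3,1,1,2,2,4,4,5,5] : List Int).length)) then s.2.2 + 1 else s.2.2)))
      (0, 0, 0)
    = (pvScore [1,2,3,4,5] answers, pvScore [2,1,2,3,2,4,2,5] answers, pvScore [3,3,1,1,2,2,4,4,5,5] answers) := by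
  have hrange : PySem.List.pyRange 0 (answers.length) 1
      = (PySem.List.enumerate answers 0).map (fun x => x.1) := by
    rw [PySem.List.map_fst_enumerate]; norm_num
  rw [hrange, List.foldl_map]
  rw [PySem.List.foldl_congr_mem (PySem.List.enumerate answers 0) _
    (fun (s : Int × Int × Int) (ia : Int × Int) =>
      ((if some ia.2 = PySem.List.pyGet? ([1,2,3,4,5] : List Int) (PySem.Int.mod ia.1 (([1,2,3,4,5] : List Int).length)) then s.1 + 1 else s.1),
       (if some ia.2 = PySem.List.pyGet? ([2,1,2,3,2,4,2,5] : List Int) (PySem.Int.mod ia.1 (([2,1,2,3,2,4,2,5] : List Int).length)) then s.2.1 + 1 else s.2.1),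
       (if some ia.2 = PySem.List.pyGet? ([3,3,1,1,2,2,4,4,5,5] : List Int) (PySem.Int.mod ia.1 (([3,3,1,1,2,2,4,4,5,5] : List Int).length)) then s.2.2 + 1 else s.2.2)))
    (0, 0, 0)
    (by intro acc x hx; rw [pv_get_of_mem_enumerate answers x hx])]
  exact pv_split answers

-- the histogram fold is Counter of the mapped key list
theorem pv_hist_eq_counter (answers : List Int) :
    pvHist answers
      = PySem.Dict.counter ((PySem.List.enumerate answers).map
          (fun ia => ((PySem.Int.mod ia.1 40, ia.2) : Int × Int))) := by
  unfold pvHist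
  rw [← PySem.Dict.foldl_insert_getD_add_one_eq_counter, List.foldl_map]

-- a 0/1 indicator sum is a count
theorem pv_sum_indicator (R : List Int) (c : Int) :
    (R.map (fun a => if a = c then (1:Int) else 0)).sum = (R.count c : Int) := by
  induction R with
  | nil => simp
  | cons a R ih =>
      rw [List.map_cons, List.sum_cons, ih]
      by_cases h : a = c
      · subst h; rw [List.count_cons_self, if_pos rfl]; push_cast; ring
      · rw [if_neg h]
        simp [List.count_cons]
        exact h

-- core counting identity: summing, over the 40 residues, the multiplicity of
-- (r, e r) in a key list whose first components all lie in [0,40) counts exactly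
-- the keys k with k.2 = e k.1
theorem pv_sum_count (e : Int → Int) (keys : List (Int × Int))
    (hb : ∀ k ∈ keys, 0 ≤ k.1 ∧ k.1 < 40) :
    ((PySem.List.pyRange 0 40 1).map
        (fun r => (keys.count ((r, e r) : Int × Int) : Int))).sum
      = (keys.countP (fun k => k.2 = e k.1) : Int) := by
  induction keys with
  | nil => simp
  | cons k t ih =>
      have hk := hb k (by simp)
      have ht : ∀ k' ∈ t, 0 ≤ k'.1 ∧ k'.1 < 40 := fun k' h => hb k' (List.mem_cons_of_mem _ h)
      have hcnt : ∀ r : Int, ((k :: t).count ((r, e r) : Int × Int) : Int)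
          = (t.count ((r, e r) : Int × Int) : Int)
            + (if ((r, e r) : Int × Int) = k then 1 else 0) := by
        intro r
        rw [List.count_cons]
        by_cases h : ((r, e r) : Int × Int) = k
        · rw [if_pos (beq_iff_eq.2 h.symm), if_pos h]; push_cast; ring
        · rw [if_neg (by simpa using fun hc => h hc.symm), if_neg h]; push_cast; ring
      calc ((PySem.List.pyRange 0 40 1).map
              (fun r => ((k :: t).count ((r, e r) : Int × Int) : Int))).sum
          = ((PySem.List.pyRange 0 40 1).map
              (fun r => (t.count ((r, e r) : Int × Int) : Int)
                + (if ((r, e r) : Int × Int) = k then 1 else 0))).sum := by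
            exact congrArg List.sum (List.map_congr_left (fun r _ => hcnt r))
        _ = ((PySem.List.pyRange 0 40 1).map
              (fun r => (t.count ((r, e r) : Int × Int) : Int))).sum
            + ((PySem.List.pyRange 0 40 1).map
              (fun r => (if ((r, e r) : Int × Int) = k then (1:Int) else 0))).sum := by
            rw [← List.sum_map_add]
        _ = (t.countP (fun k => k.2 = e k.1) : Int)
            + (if k.2 = e k.1 then 1 else 0) := by
            rw [ih ht]
            congr 1
            have hmem : k.1 ∈ PySem.List.pyRange 0 40 1 :=
              (PySem.List.mem_pyRange_one).2 ⟨hk.1, hk.2⟩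
            by_cases hke : k.2 = e k.1
            · have hz : ∀ r ∈ PySem.List.pyRange 0 40 1,
                  (if ((r, e r) : Int × Int) = k then (1:Int) else 0)
                    = (if r = k.1 then 1 else 0) := by
                intro r _
                by_cases hr : r = k.1
                · subst hr
                  rw [if_pos (show ((k.1, e k.1) : Int × Int) = k from Prod.ext_iff.2 ⟨rfl, hke.symm⟩), if_pos rfl]
                · rw [if_neg, if_neg hr]
                  intro h
                  exact hr (congrArg Prod.fst h)
              rw [List.map_congr_left hz, pv_sum_indicator]
              rw [List.count_eq_one_of_mem (PySem.List.nodup_pyRange_one 0 40) hmem]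
              simp [hke]
            · have hz : ∀ r ∈ PySem.List.pyRange 0 40 1,
                  (if ((r, e r) : Int × Int) = k then (1:Int) else 0) = 0 := by
                intro r _
                rw [if_neg]
                intro h
                apply hke
                have h1 : r = k.1 := congrArg Prod.fst h
                have h2 : e r = k.2 := congrArg Prod.snd h
                rw [← h2, h1]
              rw [List.map_congr_left hz]
              simp [hke]
        _ = ((k :: t).countP (fun k => k.2 = e k.1) : Int) := by
            rw [List.countP_cons]
            by_cases h : k.2 = e k.1 <;> simp [h]

-- reading a per-pattern score off the histogram equals the direct count,
-- for any pattern whose length divides 40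
theorem pv_patscore_eq (p : List Int) (hp : p ≠ []) (hd : (p.length : Int) ∣ 40)
    (answers : List Int) :
    pvPatScore (pvHist answers) p = pvScore p answers := by
  have hlen : (0:Int) < (p.length : Int) := by
    have : 0 < p.length := List.length_pos_of_ne_nil hp
    exact_mod_cast this
  unfold pvPatScore
  rw [pv_hist_eq_counter]
  rw [PySem.List.foldl_add]
  simp only [PySem.Dict.getD_counter]
  -- the summed counts over residues = countP over the key list
  rw [pv_sum_count (fun r => PySem.List.pyGetD p (PySem.Int.mod r (p.length)) 0)
      ((PySem.List.enumerate answers).map (fun ia => ((PySem.Int.mod ia.1 40, ia.2) : Int × Int)))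
      (by
        intro k hk
        obtain ⟨ia, _, rfl⟩ := List.mem_map.1 hk
        exact ⟨PySem.Int.mod_nonneg ia.1 (by norm_num), PySem.Int.mod_lt ia.1 (by norm_num)⟩)]
  rw [List.countP_map]
  unfold pvScore
  rw [PySem.List.foldl_ite_add_one]
  simp only [zero_add]
  congr 1
  apply List.countP_congr
  intro ia hia
  have h40 : PySem.Int.mod (PySem.Int.mod ia.1 40) (p.length) = PySem.Int.mod ia.1 (p.length) := by
    rw [PySem.Int.mod_eq_emod_of_pos hlen, PySem.Int.mod_eq_emod_of_pos hlen,
        PySem.Int.mod_eq_emod_of_pos (by norm_num : (0:Int) < 40)]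
    exact Int.emod_emod_of_dvd ia.1 hd
  have hrange : 0 ≤ PySem.Int.mod ia.1 (p.length) ∧ PySem.Int.mod ia.1 (p.length) < (p.length : Int) :=
    ⟨PySem.Int.mod_nonneg ia.1 hlen, PySem.Int.mod_lt ia.1 hlen⟩
  have hnn : 0 ≤ PySem.Int.mod ia.1 (p.length) := hrange.1
  have hlt : (PySem.Int.mod ia.1 (p.length)).toNat < p.length := by omega
  have hget : PySem.List.pyGet? p (PySem.Int.mod ia.1 (p.length))
      = some (PySem.List.pyGetD p (PySem.Int.mod ia.1 (p.length)) 0) := by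
    rw [show PySem.Int.mod ia.1 (p.length) = (((PySem.Int.mod ia.1 (p.length)).toNat : Nat) : Int)
        from (Int.toNat_of_nonneg hnn).symm]
    rw [PySem.List.pyGet?_natCast, PySem.List.pyGetD_natCast]
    simp [List.getD_eq_getElem?_getD, List.getElem?_eq_getElem hlt]
  simp only [Function.comp, h40, hget, Option.some.injEq]

-- the three concrete instances used by the verdict proof
theorem pv_ps1 (answers : List Int) :
    pvPatScore (pvHist answers) [1,2,3,4,5] = pvScore [1,2,3,4,5] answers :=
  pv_patscore_eq _ (by decide) (by decide) _
theorem pv_ps2 (answers : List Int) :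
    pvPatScore (pvHist answers) [2,1,2,3,2,4,2,5] = pvScore [2,1,2,3,2,4,2,5] answers :=
  pv_patscore_eq _ (by decide) (by decide) _
theorem pv_ps3 (answers : List Int) :
    pvPatScore (pvHist answers) [3,3,1,1,2,2,4,4,5,5] = pvScore [3,3,1,1,2,2,4,4,5,5] answers :=
  pv_patscore_eq _ (by decide) (by decide) _

-- A's index loop over the three scores plus the final sort equals B's enumerate loop
theorem pv_tail (c1 c2 c3 m : Int) :
    PySem.List.sorted
      ((PySem.List.pyRange 0 (([c1, c2, c3] : List Int).length) 1).foldl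
        (fun acc i => if PySem.List.pyGetD ([c1, c2, c3] : List Int) i 0 = m then acc ++ [i + 1] else acc) [])
      (fun x => x)
    = (PySem.List.enumerate ([c1, c2, c3] : List Int)).foldl
        (fun acc is => if is.2 = m then acc ++ [is.1 + 1] else acc) [] := by
  rw [show ((([c1, c2, c3] : List Int).length : Int)) = 3 by simp]
  rw [show PySem.List.pyRange 0 3 1 = [0, 1, 2] by decide]
  simp only [PySem.List.enumerate, List.foldl]
  norm_num [pysem]
  by_cases h1 : c1 = m <;> by_cases h2 : c2 = m <;> by_cases h3 : c3 = m <;>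
    simp [h1, h2, h3] <;> decide

-- ===== VERDICT (by name: the statement is the Claim_ definition above) =====
theorem solution_spec : Claim_equal_solution := by
  intro answers _
  unfold Spec_solution solution solution_alt
  simp only [List.map_cons, List.map_nil]
  simp only [pv_ps1, pv_ps2, pv_ps3]
  simp only [pv_scores_eq]
  exact pv_tail _ _ _ _
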